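-- pv_equiv track=rewrite | github.com/6413/Tic-Tac-Toe | Tic-Tac-Toe/peli.py | get_board_state
-- ===== SOURCE A (Python) =====
-- def get_board_state(player_map):
--     for x in range(1, 3):
--         for i in range(0, 3):
--             if player_map[i][0] == x and player_map[i][1] == x and player_map[i][2] == x:
--                 return x
--             if player_map[0][i] == x and player_map[1][i] == x and player_map[2][i] == x:
--                 return x
--
--         if player_map[0][0] == x and player_map[1][1] == x and player_map[2][2] == x:
--             return x
--         if player_map[0][2] == x and player_map[1][1] == x and player_map[2][0] == x:
--             return x
--
--     for l in player_map:
--         for i in l: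
--             if not(i):
--                 return 0
--     return 3
-- ===== SOURCE B (Python) =====
-- WINS = (0b000000111, 0b000111000, 0b111000000,
--         0b001001001, 0b010010010, 0b100100100,
--         0b100010001, 0b001010100)
--
--
-- def get_board_state(player_map):
--     m1 = m2 = 0
--     for r in range(3):
--         for c in range(3):
--             v = player_map[r][c]
--             bit = 1 << (3 * r + c)
--             if v == 1:
--                 m1 |= bit
--             elif v == 2:
--                 m2 |= bit
--     for p, m in ((1, m1), (2, m2)):
--         if any(m & w == w for w in WINS):
--             return p
--     for row in player_map:
--         for cell in row:
--             if not cell: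
--                 return 0
--     return 3
-- ===== Notes on version B (the rewrite author's own statement) =====
-- stated objective: alternative
-- what changed: Replaces per-line cell comparisons with a bitboard: one pass over the 3x3 cells packs each player's occupied squares into a 9-bit mask, and a win is tested as mask & w == w against the eight precomputed winning masks.
-- outside the precondition, e.g. on get_board_state([[1, 2, 2], [1], [1]]): A returns 1, B raises IndexError
import Mathlib
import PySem

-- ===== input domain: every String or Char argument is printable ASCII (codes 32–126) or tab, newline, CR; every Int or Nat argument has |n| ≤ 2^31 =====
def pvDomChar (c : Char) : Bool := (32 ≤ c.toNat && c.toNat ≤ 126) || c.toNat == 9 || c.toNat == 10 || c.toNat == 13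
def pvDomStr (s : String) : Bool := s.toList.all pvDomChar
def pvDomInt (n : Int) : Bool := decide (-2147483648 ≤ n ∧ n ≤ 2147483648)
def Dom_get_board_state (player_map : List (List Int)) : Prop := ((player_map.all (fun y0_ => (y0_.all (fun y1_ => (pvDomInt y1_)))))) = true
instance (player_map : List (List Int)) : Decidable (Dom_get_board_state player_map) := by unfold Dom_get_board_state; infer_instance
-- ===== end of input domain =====

-- B is an alternative bitboard implementation (each player's cells packed into a 9-bit mask,
-- wins tested against eight precomputed masks); equivalence is about the return value only.

-- ===== PORT A =====
-- player_map[i][j] for in-range i, j (Pre_ guarantees the indices A touches are in range)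
def pvCellA (m : List (List Int)) (i j : Int) : Int :=
  (PySem.List.pyGet? ((PySem.List.pyGet? m i).getD []) j).getD 0

-- the body of A's outer loop for one x: rows/columns interleaved, then the two diagonals
def pvWinA (m : List (List Int)) (x : Int) : Bool :=
  (PySem.List.pyRange 0 3 1).any (fun i =>
      (pvCellA m i 0 == x && pvCellA m i 1 == x && pvCellA m i 2 == x)
      || (pvCellA m 0 i == x && pvCellA m 1 i == x && pvCellA m 2 i == x))
  || (pvCellA m 0 0 == x && pvCellA m 1 1 == x && pvCellA m 2 2 == x)
  || (pvCellA m 0 2 == x && pvCellA m 1 1 == x && pvCellA m 2 0 == x)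

def get_board_state (player_map : List (List Int)) : Int :=
  match (PySem.List.pyRange 1 3 1).find? (fun x => pvWinA player_map x) with
  | some x => x
  | none =>
      if player_map.any (fun l => l.any (fun i => i == 0)) then 0 else 3

-- ===== PORT B =====
-- the eight winning bitmasks (cell (r, c) is bit 3*r+c): rows, columns, diagonals
def pvWins : List Int := [7, 56, 448, 73, 146, 292, 273, 84]

def pvCellB (m : List (List Int)) (r c : Int) : Int :=
  (PySem.List.pyGet? ((PySem.List.pyGet? m r).getD []) c).getD 0

-- Int.lor / Int.land / <<< are exact ports of Python's | & << on these nonnegative ints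
def get_board_state_alt (player_map : List (List Int)) : Int :=
  let ms : Int × Int :=
    (PySem.List.pyRange 0 3 1).foldl (fun ms r =>
      (PySem.List.pyRange 0 3 1).foldl (fun (ms : Int × Int) c =>
        let v := pvCellB player_map r c
        let bit : Int := (1 : Int) <<< (3 * r + c).toNat
        if v == 1 then (Int.lor ms.1 bit, ms.2)
        else if v == 2 then (ms.1, Int.lor ms.2 bit)
        else ms) ms) ((0 : Int), (0 : Int))
  match [((1 : Int), ms.1), ((2 : Int), ms.2)].find? (fun pm =>
      pvWins.any (fun w => Int.land pm.2 w == w)) with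
  | some pm => pm.1
  | none =>
      if player_map.any (fun row => row.any (fun cell => cell == 0)) then 0 else 3

-- ===== PRECONDITION & SPEC =====
-- Pre_ excludes boards with fewer than 3 rows or fewer than 3 cells in one of the first
-- three rows: on those Python A raises IndexError (except when a lucky short-circuit win
-- returns first, on which boards B's single mask-building pass itself raises IndexError).
def Pre_get_board_state (player_map : List (List Int)) : Prop :=
  3 ≤ player_map.length ∧ ∀ r ∈ player_map.take 3, 3 ≤ r.length
instance (player_map : List (List Int)) : Decidable (Pre_get_board_state player_map) := by
  unfold Pre_get_board_state; infer_instance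

def pvWitness_get_board_state : List (List Int) := [[1, 2, 0], [0, 1, 0], [2, 0, 1]]

def Spec_get_board_state (player_map : List (List Int)) (out : Int) : Prop := out = get_board_state_alt player_map
instance (player_map : List (List Int)) (out : Int) : Decidable (Spec_get_board_state player_map out) := by unfold Spec_get_board_state; infer_instance

-- ===== CLAIM (what is proved, stated in full; the proofs are below) =====
def Claim_equal_get_board_state : Prop := ∀ (player_map : List (List Int)), Dom_get_board_state player_map → Pre_get_board_state player_map → Spec_get_board_state player_map (get_board_state player_map)

-- ===== LEMMAS AND PROOFS =====

-- one conditional OR step of B's mask-building pass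
def pvOrIf (b : Bool) (m bit : Int) : Int := if b then Int.lor m bit else m

-- the canonical eight-line win condition on the nine (cell == x) Booleans, in A's order
def pvCanon (b0 b1 b2 b3 b4 b5 b6 b7 b8 : Bool) : Bool :=
  ((b0 && b1 && b2) || (b0 && b3 && b6)) || ((b3 && b4 && b5) || (b1 && b4 && b7))
  || ((b6 && b7 && b8) || (b2 && b5 && b8)) || (b0 && b4 && b8) || (b2 && b4 && b6)

-- the two-branch cell update splits into two independent conditional ORs (since 1 ≠ 2)
theorem pv_step_split (ms : Int × Int) (bit v : Int) :
    (if v == 1 then (Int.lor ms.1 bit, ms.2)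
     else if v == 2 then (ms.1, Int.lor ms.2 bit)
     else ms)
    = (pvOrIf (v == 1) ms.1 bit, pvOrIf (v == 2) ms.2 bit) := by
  by_cases h1 : v = 1 <;> by_cases h2 : v = 2 <;> simp_all [pvOrIf]

-- B's mask test equals the canonical win condition (checked over all 512 Boolean boards)
theorem pv_mask_win (b0 b1 b2 b3 b4 b5 b6 b7 b8 : Bool) :
    pvWins.any (fun w => Int.land
      (pvOrIf b8 (pvOrIf b7 (pvOrIf b6 (pvOrIf b5 (pvOrIf b4 (pvOrIf b3 (pvOrIf b2
        (pvOrIf b1 (pvOrIf b0 0 1) 2) 4) 8) 16) 32) 64) 128) 256) w == w)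
      = pvCanon b0 b1 b2 b3 b4 b5 b6 b7 b8 := by
  revert b0 b1 b2 b3 b4 b5 b6 b7 b8; decide

-- A's interleaved win check for x equals the canonical condition on the (cell == x) Booleans
set_option maxHeartbeats 1000000 in
theorem pv_win_canon (a0 a1 a2 b0 b1 b2 c0 c1 c2 : Int) (t0 t1 t2 : List Int)
    (rest : List (List Int)) (x : Int) :
    pvWinA ((a0::a1::a2::t0)::(b0::b1::b2::t1)::(c0::c1::c2::t2)::rest) x
    = pvCanon (a0 == x) (a1 == x) (a2 == x) (b0 == x) (b1 == x) (b2 == x)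
        (c0 == x) (c1 == x) (c2 == x) := by
  simp only [pvWinA, show PySem.List.pyRange 0 3 1 = [0, 1, 2] from by decide,
    List.any_cons, List.any_nil]
  simp [pvCellA, pvCanon, PySem.List.pyGet?, PySem.List.pyIdx?,
    show ∀ n : Nat, (0:Int) ≤ (n:Int) + 1 + 1 from fun n => by positivity,
    show ∀ n : Nat, (0:Int) ≤ (n:Int) + 1 from fun n => by positivity,
    show ∀ n : Nat, (2:Int) ≤ (n:Int) + 1 + 1 from fun n => by omega]
  ac_rfl

set_option maxHeartbeats 2000000 in
theorem pv_alt_canon (a0 a1 a2 b0 b1 b2 c0 c1 c2 : Int) (t0 t1 t2 : List Int)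
    (rest : List (List Int)) :
    get_board_state_alt ((a0::a1::a2::t0)::(b0::b1::b2::t1)::(c0::c1::c2::t2)::rest)
    = (if pvCanon (a0 == 1) (a1 == 1) (a2 == 1) (b0 == 1) (b1 == 1) (b2 == 1)
          (c0 == 1) (c1 == 1) (c2 == 1) then 1
       else if pvCanon (a0 == 2) (a1 == 2) (a2 == 2) (b0 == 2) (b1 == 2) (b2 == 2)
          (c0 == 2) (c1 == 2) (c2 == 2) then 2
       else if ((a0::a1::a2::t0)::(b0::b1::b2::t1)::(c0::c1::c2::t2)::rest).any
          (fun row => row.any (fun cell => cell == 0)) then 0 else 3) := by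
  unfold get_board_state_alt
  rw [show PySem.List.pyRange 0 3 1 = [(0:Int), 1, 2] from by decide]
  simp only [List.foldl_cons, List.foldl_nil, pv_step_split]
  simp only [pvCellB, PySem.List.pyGet?, PySem.List.pyIdx?]
  simp [Int.shiftLeft_eq,
    show ∀ n : Nat, (0:Int) ≤ (n:Int) + 1 + 1 from fun n => by positivity,
    show ∀ n : Nat, (0:Int) ≤ (n:Int) + 1 from fun n => by positivity,
    show ∀ n : Nat, (2:Int) ≤ (n:Int) + 1 + 1 from fun n => by omega]
  simp only [List.find?, pv_mask_win]
  cases hx1 : pvCanon (a0 == 1) (a1 == 1) (a2 == 1) (b0 == 1) (b1 == 1) (b2 == 1)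
      (c0 == 1) (c1 == 1) (c2 == 1) <;>
    cases hx2 : pvCanon (a0 == 2) (a1 == 2) (a2 == 2) (b0 == 2) (b1 == 2) (b2 == 2)
      (c0 == 2) (c1 == 2) (c2 == 2) <;> simp

set_option maxHeartbeats 2000000 in
theorem pv_main (player_map : List (List Int))
    (hpre : Pre_get_board_state player_map) :
    get_board_state player_map = get_board_state_alt player_map := by
  obtain ⟨hlen, hrow⟩ := hpre
  rcases player_map with _ | ⟨r0, m⟩; · simp at hlen
  rcases m with _ | ⟨r1, m⟩; · simp at hlen
  rcases m with _ | ⟨r2, rest⟩; · simp at hlen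
  have h0 : 3 ≤ r0.length := hrow r0 (by simp)
  have h1 : 3 ≤ r1.length := hrow r1 (by simp)
  have h2 : 3 ≤ r2.length := hrow r2 (by simp)
  rcases r0 with _ | ⟨a0, r0⟩; · simp at h0
  rcases r0 with _ | ⟨a1, r0⟩; · simp at h0
  rcases r0 with _ | ⟨a2, t0⟩; · simp at h0
  rcases r1 with _ | ⟨b0, r1⟩; · simp at h1
  rcases r1 with _ | ⟨b1, r1⟩; · simp at h1
  rcases r1 with _ | ⟨b2, t1⟩; · simp at h1
  rcases r2 with _ | ⟨c0, r2⟩; · simp at h2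
  rcases r2 with _ | ⟨c1, r2⟩; · simp at h2
  rcases r2 with _ | ⟨c2, t2⟩; · simp at h2
  rw [pv_alt_canon]
  unfold get_board_state
  rw [show PySem.List.pyRange 1 3 1 = [(1:Int), 2] from by decide]
  simp only [pv_win_canon, List.find?]
  cases hx1 : pvCanon (a0 == 1) (a1 == 1) (a2 == 1) (b0 == 1) (b1 == 1) (b2 == 1)
      (c0 == 1) (c1 == 1) (c2 == 1) <;>
    cases hx2 : pvCanon (a0 == 2) (a1 == 2) (a2 == 2) (b0 == 2) (b1 == 2) (b2 == 2)
      (c0 == 2) (c1 == 2) (c2 == 2) <;> simp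

-- ===== VERDICT (by name: the statement is the Claim_ definition above) =====
theorem get_board_state_spec : Claim_equal_get_board_state := by
  intro m _ hpre
  exact pv_main m hpre
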